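-- pv_equiv track=rewrite | github.com/ThomasVuNguyen/3d-synth-gen | generate-entity2.py | fallback_items
-- ===== SOURCE A (Python) =====
-- from typing import Optional, Dict, Any, List
--
-- def fallback_items(count: int) -> List[Dict[str, str]]:
--     seeds = [
--         ("wooden chair", "A wooden chair with a slatted backrest, four tapered legs, cross-bracing, and a contoured seat with a clear finish."),
--         ("glass bottle", "A clear glass bottle with a narrow threaded neck, cylindrical body, rounded shoulder, and thick base for stability."),
--         ("metal toolbox", "A steel toolbox featuring a hinged lid, removable tray, latch closures, corner reinforcements, and a fold-down handle."),
--         ("ceramic bowl", "A glazed ceramic bowl with a wide rim, smooth interior, curved walls, and a small foot ring for balance."),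
--         ("desk lamp", "An adjustable desk lamp with a weighted base, articulated arm, swivel head, heat venting, and an inline switch."),
--     ]
--     out: List[Dict[str, str]] = []
--     i = 0
--     while len(out) < count:
--         name, desc = seeds[i % len(seeds)]
--         out.append({"object": name, "description": desc})
--         i += 1
--     return out[:count]
-- ===== SOURCE B (Python) =====
-- from typing import Optional, Dict, Any, List
--
-- def fallback_items(count: int) -> List[Dict[str, str]]:
--     seeds = [
--         ("wooden chair", "A wooden chair with a slatted backrest, four tapered legs, cross-bracing, and a contoured seat with a clear finish."),
--         ("glass bottle", "A clear glass bottle with a narrow threaded neck, cylindrical body, rounded shoulder, and thick base for stability."),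
--         ("metal toolbox", "A steel toolbox featuring a hinged lid, removable tray, latch closures, corner reinforcements, and a fold-down handle."),
--         ("ceramic bowl", "A glazed ceramic bowl with a wide rim, smooth interior, curved walls, and a small foot ring for balance."),
--         ("desk lamp", "An adjustable desk lamp with a weighted base, articulated arm, swivel head, heat venting, and an inline switch."),
--     ]
--     q, r = divmod(max(count, 0), len(seeds))
--     replicated = seeds * q + seeds[:r]
--     return [{"object": name, "description": desc} for name, desc in replicated]
-- ===== Notes on version B (the rewrite author's own statement) =====
-- stated objective: simpler
-- what changed: Replaces the while-loop that appends one dict per iteration (indexing seeds by i % len) with a closed-form divmod block replication: seeds*q + seeds[:r] built once, then a single comprehension maps each tuple to a fresh dict.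
import Mathlib
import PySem

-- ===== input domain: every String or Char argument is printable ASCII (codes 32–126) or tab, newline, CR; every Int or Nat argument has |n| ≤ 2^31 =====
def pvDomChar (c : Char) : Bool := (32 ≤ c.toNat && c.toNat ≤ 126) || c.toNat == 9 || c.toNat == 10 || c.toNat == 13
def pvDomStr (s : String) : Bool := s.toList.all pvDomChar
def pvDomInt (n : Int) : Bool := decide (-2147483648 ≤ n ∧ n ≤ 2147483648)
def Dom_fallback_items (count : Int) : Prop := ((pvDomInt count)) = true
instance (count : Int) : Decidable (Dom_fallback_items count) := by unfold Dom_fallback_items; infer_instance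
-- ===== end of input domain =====

-- B replaces A's while-loop (append one dict per step, index = i % len) by divmod block
-- replication seeds*q + seeds[:r] mapped once to dicts; objective: simpler. Equivalence is
-- about the return value; neither version mutates its argument.

-- the seed list both Python versions write out literally
def pvSeeds : List (String × String) := [
  ("wooden chair", "A wooden chair with a slatted backrest, four tapered legs, cross-bracing, and a contoured seat with a clear finish."),
  ("glass bottle", "A clear glass bottle with a narrow threaded neck, cylindrical body, rounded shoulder, and thick base for stability."),
  ("metal toolbox", "A steel toolbox featuring a hinged lid, removable tray, latch closures, corner reinforcements, and a fold-down handle."),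
  ("ceramic bowl", "A glazed ceramic bowl with a wide rim, smooth interior, curved walls, and a small foot ring for balance."),
  ("desk lamp", "An adjustable desk lamp with a weighted base, articulated arm, swivel head, heat venting, and an inline switch.")]

-- {"object": name, "description": desc}
def pvRow (p : String × String) : List (String × String) :=
  [("object", p.1), ("description", p.2)]

-- ===== PORT A =====
-- while len(out) < count: name, desc = seeds[i % len(seeds)]; out.append({...}); i += 1
-- seeds[i % len(seeds)] is always in range (0 ≤ i), so .getD ("","") is exact here.
def fallbackLoopA (count : Int) (out : List (List (String × String))) (i : Nat) :
    List (List (String × String)) :=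
  if h : (out.length : Int) < count then
    fallbackLoopA count
      (out ++ [pvRow ((PySem.List.pyGet? pvSeeds
          (PySem.Int.mod (i : Int) (PySem.List.len pvSeeds))).getD ("", ""))])
      (i + 1)
  else out
termination_by (count - out.length).toNat
decreasing_by simp [List.length_append]; omega

def fallback_items (count : Int) : List (List (String × String)) :=
  PySem.List.slice (fallbackLoopA count [] 0) none (some count)   -- out[:count]

-- ===== PORT B =====
-- q, r = divmod(max(count, 0), len(seeds)); replicated = seeds*q + seeds[:r]; comprehension
def fallback_items_alt (count : Int) : List (List (String × String)) :=
  let q := PySem.Int.floordiv (max count 0) (PySem.List.len pvSeeds)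
  let r := PySem.Int.mod (max count 0) (PySem.List.len pvSeeds)
  let replicated := (List.replicate q.toNat pvSeeds).flatten ++ pvSeeds.take r.toNat
  replicated.map pvRow

-- ===== PRECONDITION & SPEC =====
def Spec_fallback_items (count : Int) (out : List (List (String × String))) : Prop := out = fallback_items_alt count
instance (count : Int) (out : List (List (String × String))) : Decidable (Spec_fallback_items count out) := by unfold Spec_fallback_items; infer_instance

-- ===== CLAIM (what is proved, stated in full; the proofs are below) =====
def Claim_equal_fallback_items : Prop := ∀ (count : Int), Dom_fallback_items count → Spec_fallback_items count (fallback_items count)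

-- ===== LEMMAS AND PROOFS =====

-- the list of k rows A's loop produces starting at index i
def gA : Nat → Nat → List (List (String × String))
  | 0, _ => []
  | k + 1, i => pvRow (pvSeeds.getD (i % 5) ("", "")) :: gA k (i + 1)

lemma gA_length : ∀ (k i : Nat), (gA k i).length = k := by
  intro k
  induction k with
  | zero => intro i; rfl
  | succ k ih => intro i; simp [gA, ih]

lemma gA_shift : ∀ (k i : Nat), gA k (i + 5) = gA k i := by
  intro k
  induction k with
  | zero => intro i; rfl
  | succ k ih =>
    intro i
    simp only [gA, Nat.add_mod_right]
    rw [show i + 5 + 1 = (i + 1) + 5 from by omega, ih]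

lemma gA_peel (m : Nat) : gA (m + 5) 0 = pvSeeds.map pvRow ++ gA m 5 := rfl

lemma gA_block : ∀ (q r : Nat), r < 5 →
    gA (5 * q + r) 0 = ((List.replicate q pvSeeds).flatten ++ pvSeeds.take r).map pvRow := by
  intro q
  induction q with
  | zero =>
    intro r hr
    interval_cases r <;> rfl
  | succ q ih =>
    intro r hr
    rw [show 5 * (q + 1) + r = (5 * q + r) + 5 from by ring, gA_peel, gA_shift, ih r hr,
      List.replicate_succ, List.flatten_cons, List.append_assoc]
    simp [List.map_append]

lemma loopA_eq (count : Int) : ∀ (k : Nat) (out : List (List (String × String))) (i : Nat),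
    (count - out.length).toNat = k → fallbackLoopA count out i = out ++ gA k i := by
  intro k
  induction k with
  | zero =>
    intro out i hk
    rw [fallbackLoopA, dif_neg (by omega)]
    simp [gA]
  | succ k ih =>
    intro out i hk
    rw [fallbackLoopA, dif_pos (by omega)]
    have hidx : (PySem.List.pyGet? pvSeeds
        (PySem.Int.mod (i : Int) (PySem.List.len pvSeeds))).getD ("", "")
        = pvSeeds.getD (i % 5) ("", "") := by
      have h5 : PySem.List.len pvSeeds = ((5 : Nat) : Int) := by decide
      rw [h5, PySem.Int.mod_natCast, PySem.List.pyGet?_natCast]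
      simp [List.getD_eq_getElem?_getD]
    rw [ih (out ++ [pvRow ((PySem.List.pyGet? pvSeeds
          (PySem.Int.mod (i : Int) (PySem.List.len pvSeeds))).getD ("", ""))]) (i + 1)
        (by simp [List.length_append]; omega)]
    rw [hidx, List.append_assoc]
    rfl

-- ===== VERDICT (by name: the statement is the Claim_ definition above) =====
theorem fallback_items_spec : Claim_equal_fallback_items := by
  intro count _
  unfold Spec_fallback_items fallback_items fallback_items_alt
  by_cases hc : 0 < count
  · -- positive count: loop builds exactly count rows, the slice keeps all of them
    set n := count.toNat with hn
    have hcn : count = (n : Int) := by omega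
    have h5 : PySem.List.len pvSeeds = ((5 : Nat) : Int) := by decide
    have hloop : fallbackLoopA count [] 0 = gA n 0 := by
      rw [loopA_eq count n [] 0 (by simp; omega)]; rfl
    rw [hloop, hcn, PySem.List.slice_to_natCast,
      List.take_of_length_le (by rw [gA_length])]
    have hq : PySem.Int.floordiv (max ((n : Nat) : Int) 0) (PySem.List.len pvSeeds) = ((n / 5 : Nat) : Int) := by
      rw [show max ((n : Nat) : Int) 0 = ((n : Nat) : Int) from by omega, h5, PySem.Int.floordiv_natCast]
    have hr : PySem.Int.mod (max ((n : Nat) : Int) 0) (PySem.List.len pvSeeds) = ((n % 5 : Nat) : Int) := by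
      rw [show max ((n : Nat) : Int) 0 = ((n : Nat) : Int) from by omega, h5, PySem.Int.mod_natCast]
    simp only [hq, hr, Int.toNat_natCast]
    rw [← gA_block (n / 5) (n % 5) (Nat.mod_lt n (by omega)), Nat.div_add_mod]
  · -- count ≤ 0: the loop never runs and both sides are empty
    have hloop : fallbackLoopA count [] 0 = [] := by
      rw [fallbackLoopA, dif_neg (by simpa using hc)]
    have hmax : max count 0 = 0 := by omega
    rw [hloop, hmax]
    simp [PySem.List.slice, PySem.Int.floordiv, PySem.Int.mod]
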